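-- pv_equiv track=rewrite | github.com/Ombhavsar218/redscan | rescanai/scan_controller.py | _get_vulnerability_assessment_messages
-- ===== SOURCE A (Python) =====
-- from typing import Dict, List, Any, Optional, Callable
--
-- def _get_vulnerability_assessment_messages(step_count: int) -> List[str]:
--     """Generate different vulnerability assessment messages"""
--     base_messages = [
--         "Starting comprehensive vulnerability assessment...",
--         "Checking for known CVEs...",
--         "Analyzing software versions...",
--         "Testing for zero-day vulnerabilities...",
--         "Checking configuration weaknesses...",
--         "Analyzing access controls...",
--         "Testing privilege escalation...",
--         "Checking for backdoors...",
--         "Analyzing cryptographic implementations...",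
--         "Testing for buffer overflows...",
--         "Checking for race conditions...",
--         "Analyzing memory corruption issues...",
--         "Testing for logic flaws...",
--         "Checking for timing attacks...",
--         "Analyzing side-channel vulnerabilities...",
--         "Testing for injection flaws...",
--         "Checking for deserialization issues...",
--         "Analyzing XML external entities...",
--         "Testing for LDAP injection...",
--         "Checking for command injection...",
--         "Analyzing path traversal vulnerabilities...",
--         "Testing for file inclusion flaws...",
--         "Checking for insecure redirects...",
--         "Analyzing business logic flaws...",
--         "Finalizing vulnerability assessment..."
--     ]
--
--     messages = []
--     for i in range(step_count):
--         messages.append(base_messages[i % len(base_messages)])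
--     return messages
-- ===== SOURCE B (Python) =====
-- def _get_vulnerability_assessment_messages(step_count):
--     """Generate different vulnerability assessment messages"""
--     base_messages = [
--         "Starting comprehensive vulnerability assessment...",
--         "Checking for known CVEs...",
--         "Analyzing software versions...",
--         "Testing for zero-day vulnerabilities...",
--         "Checking configuration weaknesses...",
--         "Analyzing access controls...",
--         "Testing privilege escalation...",
--         "Checking for backdoors...",
--         "Analyzing cryptographic implementations...",
--         "Testing for buffer overflows...",
--         "Checking for race conditions...",
--         "Analyzing memory corruption issues...",
--         "Testing for logic flaws...",
--         "Checking for timing attacks...",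
--         "Analyzing side-channel vulnerabilities...",
--         "Testing for injection flaws...",
--         "Checking for deserialization issues...",
--         "Analyzing XML external entities...",
--         "Testing for LDAP injection...",
--         "Checking for command injection...",
--         "Analyzing path traversal vulnerabilities...",
--         "Testing for file inclusion flaws...",
--         "Checking for insecure redirects...",
--         "Analyzing business logic flaws...",
--         "Finalizing vulnerability assessment..."
--     ]
--     if step_count <= 0:
--         return []
--     q, r = divmod(step_count, len(base_messages))
--     return base_messages * q + base_messages[:r]
-- ===== Notes on version B (the rewrite author's own statement) =====
-- stated objective: simpler
-- what changed: Replaces the per-step append loop indexing base_messages[i % n] with whole-list replication plus one slice: q, r = divmod(step_count, n); return base_messages * q + base_messages[:r], guarded by an early return [] for non-positive counts.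
import Mathlib
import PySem

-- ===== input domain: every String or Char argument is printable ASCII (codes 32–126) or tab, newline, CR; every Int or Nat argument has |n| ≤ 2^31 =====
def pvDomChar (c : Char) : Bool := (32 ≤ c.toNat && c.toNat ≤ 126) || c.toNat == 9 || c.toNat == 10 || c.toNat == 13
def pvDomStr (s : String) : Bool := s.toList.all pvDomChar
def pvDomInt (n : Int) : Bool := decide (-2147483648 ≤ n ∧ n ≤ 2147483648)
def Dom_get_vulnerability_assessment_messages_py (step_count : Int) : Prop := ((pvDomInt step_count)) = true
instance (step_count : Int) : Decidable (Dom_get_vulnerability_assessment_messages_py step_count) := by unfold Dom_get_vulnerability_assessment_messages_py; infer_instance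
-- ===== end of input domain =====

-- B builds the answer by whole-list replication plus one slice (divmod) instead of A's per-index loop; objective: simpler.

-- the base_messages literal, identical in both Pythons
def pvBaseMessages : List String := [
  "Starting comprehensive vulnerability assessment...",
  "Checking for known CVEs...",
  "Analyzing software versions...",
  "Testing for zero-day vulnerabilities...",
  "Checking configuration weaknesses...",
  "Analyzing access controls...",
  "Testing privilege escalation...",
  "Checking for backdoors...",
  "Analyzing cryptographic implementations...",
  "Testing for buffer overflows...",
  "Checking for race conditions...",
  "Analyzing memory corruption issues...",
  "Testing for logic flaws...",
  "Checking for timing attacks...",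
  "Analyzing side-channel vulnerabilities...",
  "Testing for injection flaws...",
  "Checking for deserialization issues...",
  "Analyzing XML external entities...",
  "Testing for LDAP injection...",
  "Checking for command injection...",
  "Analyzing path traversal vulnerabilities...",
  "Testing for file inclusion flaws...",
  "Checking for insecure redirects...",
  "Analyzing business logic flaws...",
  "Finalizing vulnerability assessment..."]

-- ===== PORT A =====
-- messages = []; for i in range(step_count): messages.append(base_messages[i % len(base_messages)])
def get_vulnerability_assessment_messages_py (step_count : Int) : List String :=
  (PySem.List.pyRange 0 step_count 1).foldl
    (fun messages i =>
      messages ++ [PySem.List.pyGetD pvBaseMessages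
        (PySem.Int.mod i (pvBaseMessages.length : Int)) ""]) []

-- ===== PORT B =====
-- if step_count <= 0: return []; q, r = divmod(step_count, n); return base_messages * q + base_messages[:r]
def get_vulnerability_assessment_messages_py_alt (step_count : Int) : List String :=
  if step_count ≤ 0 then []
  else
    match PySem.Int.divmod? step_count (pvBaseMessages.length : Int) with
    | none => []
    | some (q, r) =>
      (List.replicate q.toNat pvBaseMessages).flatten ++
        PySem.List.slice pvBaseMessages none (some r)

-- ===== PRECONDITION & SPEC =====
def Spec_get_vulnerability_assessment_messages_py (step_count : Int) (out : List String) : Prop := out = get_vulnerability_assessment_messages_py_alt step_count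
instance (step_count : Int) (out : List String) : Decidable (Spec_get_vulnerability_assessment_messages_py step_count out) := by unfold Spec_get_vulnerability_assessment_messages_py; infer_instance

-- ===== CLAIM (what is proved, stated in full; the proofs are below) =====
def Claim_equal_get_vulnerability_assessment_messages_py : Prop := ∀ (step_count : Int), Dom_get_vulnerability_assessment_messages_py step_count → Spec_get_vulnerability_assessment_messages_py step_count (get_vulnerability_assessment_messages_py step_count)

-- ===== LEMMAS AND PROOFS =====

-- the cycle prefix as a closed form over naturals
theorem pv_cycle_closed (n : Nat) :
    (List.range n).map (fun k => pvBaseMessages.getD (k % 25) "") =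
      (List.replicate (n / 25) pvBaseMessages).flatten ++ pvBaseMessages.take (n % 25) := by
  induction n with
  | zero => simp
  | succ n ih =>
    rw [List.range_succ, List.map_append, ih]
    simp only [List.map_cons, List.map_nil]
    by_cases h : n % 25 = 24
    · rw [h, (by omega : (n + 1) / 25 = n / 25 + 1), (by omega : (n + 1) % 25 = 0),
        List.replicate_succ', List.flatten_append, List.take_zero, List.append_nil,
        List.append_assoc]
      congr 1
    · rw [(by omega : (n + 1) / 25 = n / 25), (by omega : (n + 1) % 25 = n % 25 + 1),
        List.append_assoc]
      congr 1
      have hlt : n % 25 < pvBaseMessages.length := by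
        have : pvBaseMessages.length = 25 := by decide
        omega
      rw [List.take_add_one, List.getElem?_eq_getElem hlt]
      simp [List.getD, List.getElem?_eq_getElem hlt]

theorem get_vulnerability_assessment_messages_py_spec : Claim_equal_get_vulnerability_assessment_messages_py := by
  unfold Claim_equal_get_vulnerability_assessment_messages_py
  intro step_count _
  unfold Spec_get_vulnerability_assessment_messages_py
  unfold get_vulnerability_assessment_messages_py get_vulnerability_assessment_messages_py_alt
  by_cases hle : step_count ≤ 0
  · rw [if_pos hle]
    have : PySem.List.pyRange 0 step_count 1 = [] := by
      simp [PySem.List.pyRange]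
      omega
    simp [this]
  · rw [if_neg hle]
    have hpos : 0 < step_count := lt_of_not_ge hle
    obtain ⟨n, rfl⟩ : ∃ n : Nat, step_count = (n : Int) :=
      ⟨step_count.toNat, (Int.toNat_of_nonneg (le_of_lt hpos)).symm⟩
    rw [PySem.List.foldl_append_singleton_eq_map]
    have hlen : pvBaseMessages.length = 25 := by decide
    rw [PySem.List.pyRange_zero_natCast, List.map_map]
    have hdm : PySem.Int.divmod? (n : Int) (pvBaseMessages.length : Int) =
        some (((n / 25 : Nat) : Int), ((n % 25 : Nat) : Int)) := by
      rw [hlen]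
      simp [PySem.Int.divmod?]
      exact ⟨by exact_mod_cast PySem.Int.floordiv_natCast n 25,
             by exact_mod_cast PySem.Int.mod_natCast n 25⟩
    rw [hdm]
    simp only [Int.toNat_natCast, PySem.List.slice_to_natCast]
    rw [List.nil_append]
    have hmap : List.map ((fun i => PySem.List.pyGetD pvBaseMessages
          (PySem.Int.mod i (pvBaseMessages.length : Int)) "") ∘ fun k : Nat => (k : Int))
          (List.range n) =
        List.map (fun k => pvBaseMessages.getD (k % 25) "") (List.range n) := by
      apply List.map_congr_left
      intro k _
      simp only [Function.comp_apply]
      rw [hlen, PySem.Int.mod_natCast, PySem.List.pyGetD_natCast]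
    rw [hmap, pv_cycle_closed]
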